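-- pv_equiv track=rewrite | github.com/rfc1036/kit-censura | download_consob.py | filter_subdomains
-- ===== SOURCE A (Python) =====
-- def filter_subdomains(domains):
--     """
--     Mantiene solo i domini che NON sono sottodomini di un altro dominio presente.
--     Esempio: se ci sono 'pippo.pluto.it' e 'pluto.it' → resta solo 'pluto.it'.
--     Se c’è solo 'pippo.pluto.it' → resta quello.
--     """
--     s = set(domains)
--     keep = set()
--     for d in s:
--         is_sub = any((d != e and d.endswith("." + e)) for e in s)
--         if not is_sub:
--             keep.add(d)
--     return keep
-- ===== SOURCE B (Python) =====
-- def filter_subdomains(domains):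
--     """
--     Keep only domains that are not subdomains of another present domain,
--     by looking up each dot-suffix of d in a hash set instead of scanning
--     every pair (O(total length) instead of O(n^2) endswith tests).
--     """
--     s = set(domains)
--     return {d for d in s
--             if not any(c == '.' and d[i + 1:] in s for i, c in enumerate(d))}
-- ===== Notes on version B (the rewrite author's own statement) =====
-- stated objective: faster
-- what changed: Instead of testing every domain against every other with endswith (all-pairs scan), B checks for each domain whether any of its own dot-suffixes is present in the hash set of domains, removing the inner scan over the whole list.
import Mathlib
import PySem

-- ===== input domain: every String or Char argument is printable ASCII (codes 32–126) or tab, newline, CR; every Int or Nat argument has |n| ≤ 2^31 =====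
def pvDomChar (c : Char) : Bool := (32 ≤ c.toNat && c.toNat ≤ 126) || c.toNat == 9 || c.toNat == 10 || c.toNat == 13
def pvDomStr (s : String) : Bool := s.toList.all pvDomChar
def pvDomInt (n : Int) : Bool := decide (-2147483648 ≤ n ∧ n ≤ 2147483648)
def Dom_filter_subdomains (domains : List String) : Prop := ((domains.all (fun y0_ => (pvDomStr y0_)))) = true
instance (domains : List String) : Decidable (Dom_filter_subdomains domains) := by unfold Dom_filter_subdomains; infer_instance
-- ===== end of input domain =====

-- B replaces A's quadratic all-pairs endswith scan by a hash-set lookup of each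
-- domain's dot-suffixes (objective: faster). Both return a Python set.

-- ===== PORT A =====
def filter_subdomains (domains : List String) : List String :=
  let s : PySem.Set String := PySem.Set.ofList domains
  s.foldl (fun keep d =>
    let is_sub := s.any (fun e => (d != e) && PySem.Str.endswith d (String.ofList ('.' :: e.toList)))
    if !is_sub then PySem.Set.add keep d else keep) PySem.Set.empty

-- ===== PORT B =====
def filter_subdomains_alt (domains : List String) : List String :=
  let s : PySem.Set String := PySem.Set.ofList domains
  s.filter (fun d =>
    !((PySem.List.enumerate d.toList 0).any (fun ic =>
        ic.2 == '.' && PySem.Set.contains s (String.ofList (PySem.List.slice d.toList (some (ic.1 + 1)) none)))))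

-- ===== PRECONDITION & SPEC =====
def Spec_filter_subdomains (domains : List String) (out : List String) : Prop := out = filter_subdomains_alt domains
instance (domains : List String) (out : List String) : Decidable (Spec_filter_subdomains domains out) := by unfold Spec_filter_subdomains; infer_instance

-- ===== CLAIM (what is proved, stated in full; the proofs are below) =====
def Claim_equal_filter_subdomains : Prop := ∀ (domains : List String), Dom_filter_subdomains domains → Spec_filter_subdomains domains (filter_subdomains domains)

-- ===== LEMMAS AND PROOFS =====

-- adding a fresh element to a Python set appends it
theorem pv_add_not_mem (s : List String) (x : String) (h : x ∉ s) :
    PySem.Set.add s x = s ++ [x] := by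
  simp [PySem.Set.add, h]

-- membership in enumerate, by index
theorem pv_mem_enumerate (xs : List Char) (i : Int) (c : Char) (s : Int) :
    (i, c) ∈ PySem.List.enumerate xs s ↔ ∃ k : Nat, xs[k]? = some c ∧ i = s + k := by
  induction xs generalizing s with
  | nil => simp [PySem.List.enumerate_nil]
  | cons a tl ih =>
      rw [PySem.List.enumerate_cons]
      simp only [List.mem_cons, ih, Prod.mk.injEq]
      constructor
      · rintro (⟨rfl, rfl⟩ | ⟨k, hk, rfl⟩)
        · exact ⟨0, by simp, by omega⟩
        · exact ⟨k + 1, by simpa using hk, by push_cast; ring⟩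
      · rintro ⟨k, hk, rfl⟩
        cases k with
        | zero => left; simp at hk; simp [hk]
        | succ k => right; exact ⟨k, by simpa using hk, by push_cast; ring⟩

-- A's accumulation loop over a duplicate-free list is a filter
theorem pv_foldl_filter (q : String → Bool) :
    ∀ (l acc : List String), l.Nodup → (∀ x ∈ l, x ∉ acc) →
    l.foldl (fun keep d => if q d then PySem.Set.add keep d else keep) acc
      = acc ++ l.filter q := by
  intro l
  induction l with
  | nil => intro acc _ _; simp
  | cons d tl ih =>
      intro acc hnd hdisj
      rw [List.foldl_cons]
      by_cases hq : q d
      · rw [if_pos hq, pv_add_not_mem acc d (hdisj d (List.mem_cons_self))]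
        rw [ih (acc ++ [d]) (List.nodup_cons.mp hnd).2 (by
          intro x hx
          simp only [List.mem_append, List.mem_singleton]
          rintro (h | rfl)
          · exact hdisj x (List.mem_cons_of_mem d hx) h
          · exact (List.nodup_cons.mp hnd).1 hx)]
        simp [hq]
      · rw [if_neg hq, ih acc (List.nodup_cons.mp hnd).2
          (fun x hx => hdisj x (List.mem_cons_of_mem d hx))]
        simp [hq]

-- a '.'-headed suffix corresponds to a dot position and the tail after it
theorem pv_dot_suffix_iff (cs u : List Char) :
    ('.' :: u) <:+ cs ↔ ∃ k : Nat, cs[k]? = some '.' ∧ cs.drop (k + 1) = u := by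
  constructor
  · rintro ⟨t, rfl⟩
    refine ⟨t.length, ?_, ?_⟩
    · simp
    · simp

  · rintro ⟨k, hk, hd⟩
    have hlt : k < cs.length := (List.getElem?_eq_some_iff.mp hk).1
    refine ⟨cs.take k, ?_⟩
    have h1 : cs.drop k = cs[k] :: cs.drop (k + 1) := (List.getElem_cons_drop hlt).symm
    have h2 : cs[k] = '.' := (List.getElem?_eq_some_iff.mp hk).2
    rw [h2, hd] at h1
    rw [← h1, List.take_append_drop]

-- core: A's per-element subdomain test equals B's dot-suffix lookup
theorem pv_pred_eq (s : List String) (d : String) :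
    (s.any fun e => (d != e) && PySem.Str.endswith d (String.ofList ('.' :: e.toList)))
      = ((PySem.List.enumerate d.toList 0).any fun ic =>
          ic.2 == '.' && PySem.Set.contains s (String.ofList (PySem.List.slice d.toList (some (ic.1 + 1)) none))) := by
  rw [Bool.eq_iff_iff]
  simp only [List.any_eq_true, Bool.and_eq_true, bne_iff_ne, ne_eq, beq_iff_eq,
    PySem.Str.endswith_eq, String.toList_ofList, PySem.Chars.endswith_iff,
    PySem.Set.contains_iff]
  constructor
  · rintro ⟨e, he, hne, hsuf⟩
    obtain ⟨k, hk, hd⟩ := (pv_dot_suffix_iff d.toList e.toList).mp hsuf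
    refine ⟨((k : Int), '.'), (pv_mem_enumerate d.toList k '.' 0).mpr ⟨k, hk, by omega⟩, rfl, ?_⟩
    rw [PySem.List.slice_from (a := (k : Int) + 1) d.toList (by omega)]
    have : ((k : Int) + 1).toNat = k + 1 := by omega
    rw [this, hd, String.ofList_toList]
    exact he
  · rintro ⟨⟨i, c⟩, hmem, hc, hcont⟩
    obtain ⟨k, hk, rfl⟩ := (pv_mem_enumerate d.toList i c 0).mp hmem
    subst hc
    rw [PySem.List.slice_from (a := 0 + (k : Int) + 1) d.toList (by omega)] at hcont
    have htn : (0 + (k : Int) + 1).toNat = k + 1 := by omega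
    rw [htn] at hcont
    refine ⟨String.ofList (d.toList.drop (k + 1)), hcont, ?_, ?_⟩
    · intro hde
      have hlt : k < d.toList.length := (List.getElem?_eq_some_iff.mp hk).1
      have : (String.ofList (d.toList.drop (k + 1))).toList.length = d.toList.length - (k + 1) := by
        simp
      rw [← hde] at this
      omega
    · exact (pv_dot_suffix_iff d.toList _).mpr ⟨k, hk, by simp⟩

-- ===== VERDICT (by name: the statement is the Claim_ definition above) =====
theorem filter_subdomains_spec : Claim_equal_filter_subdomains := by
  intro domains _
  unfold Spec_filter_subdomains filter_subdomains filter_subdomains_alt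
  rw [pv_foldl_filter _ (PySem.Set.ofList domains) PySem.Set.empty
      (PySem.Set.nodup_ofList domains) (by intro x _ h; simp [PySem.Set.empty] at h)]
  simp only [PySem.Set.empty, List.nil_append]
  refine List.filter_congr ?_
  intro d _
  rw [pv_pred_eq]
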